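-- pv_equiv track=rewrite | github.com/matthematics/schubmult | src/schubmult/schub_lib/tests/legacy_perm_lib.py | medium_theta
-- ===== SOURCE A (Python) =====
-- from bisect import bisect_left
--
-- def code(perm):
--     L = len(perm)
--     ret = []
--     v = list(range(1, L + 1))
--     for i in range(L - 1):
--         itr = bisect_left(v, perm[i])
--         ret += [itr]
--         v = v[:itr] + v[itr + 1 :]
--     return ret
--
-- def medium_theta(perm):
--     cd = code(perm)
--     found_one = True
--     while found_one:
--         found_one = False
--         for i in range(len(cd) - 1):
--             if cd[i] < cd[i + 1]:
--                 found_one = True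
--                 cd[i], cd[i + 1] = cd[i + 1] + 1, cd[i]
--                 break
--             if cd[i] == cd[i + 1] and cd[i] != 0 and i > 0 and cd[i - 1] <= cd[i] + 1:
--                 # if cd[i]==cd[i+1] and i>0 and cd[i-1]<=cd[i]+1:
--                 cd[i] += 1
--                 found_one = True
--                 break
--     return cd
-- ===== SOURCE B (Python) =====
-- def medium_theta(perm):
--     L = len(perm)
--     # Lehmer-style code: scan the remaining values directly (count + remove-first)
--     # instead of binary search + list slicing.
--     v = list(range(1, L + 1))
--     cd = []
--     for i in range(L - 1):
--         p = perm[i]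
--         cd.append(sum(1 for w in v if w < p))
--         for k in range(len(v)):
--             if v[k] >= p:
--                 del v[k]
--                 break
--     # staircase transform: single pointer with local backtracking instead of
--     # restarting the scan from index 0 after every rewrite.
--     i = 0
--     while i + 1 < len(cd):
--         if cd[i] < cd[i + 1]:
--             cd[i], cd[i + 1] = cd[i + 1] + 1, cd[i]
--             i = i - 1 if i > 0 else 0
--         elif cd[i] == cd[i + 1] and cd[i] != 0 and i > 0 and cd[i - 1] <= cd[i] + 1:
--             cd[i] += 1
--             i -= 1
--         else:
--             i += 1
--     return cd
-- ===== Notes on version B (the rewrite author's own statement) =====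
-- stated objective: faster
-- what changed: The staircase transform uses a single pointer with local backtracking (re-check from i-1 after a rewrite) instead of restarting a full scan from index 0 after every rewrite, and the code part counts/removes in the remaining-values list directly instead of binary search plus list slicing.
import Mathlib
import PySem

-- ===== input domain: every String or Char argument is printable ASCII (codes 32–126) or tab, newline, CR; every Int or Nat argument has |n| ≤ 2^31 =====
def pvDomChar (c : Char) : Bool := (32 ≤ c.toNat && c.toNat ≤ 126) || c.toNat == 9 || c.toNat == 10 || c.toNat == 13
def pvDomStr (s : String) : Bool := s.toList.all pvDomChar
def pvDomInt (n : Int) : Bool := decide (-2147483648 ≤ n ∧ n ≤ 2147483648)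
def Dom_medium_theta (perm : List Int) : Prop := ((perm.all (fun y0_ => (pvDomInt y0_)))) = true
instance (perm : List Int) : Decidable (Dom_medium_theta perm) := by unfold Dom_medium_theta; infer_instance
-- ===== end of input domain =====

-- B replaces A's restart-from-0 rewrite loop by a single pointer with local backtracking
-- (and the code part scans the remaining-values list instead of bisect + slicing): faster.
-- Both while-loops are ported with an explicit fuel that only makes the computation total;
-- the sufficiency of the fuel is proved below (the loops reach their fixpoint within it).

-- ===== PORT A =====

-- spec-level port of Python's stdlib bisect.bisect_left on a sorted list:
-- first index whose element is ≥ x (= insertion point)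
def bisectLeft (v : List Int) (x : Int) : Nat := (v.findIdx? (fun y => x ≤ y)).getD v.length

-- `v = list(range(1, L + 1))` (shared initial value of both Pythons' loops)
def startV (L : Nat) : List Int := (List.range L).map (fun k : Nat => (k : Int) + 1)

-- one iteration of A's `for` body: itr = bisect_left(v, perm[i]); ret += [itr]; v = v[:itr]+v[itr+1:]
def stepA (perm : List Int) (st : List Int × List Int) (i : Nat) : List Int × List Int :=
  let itr := bisectLeft st.2 (perm.getD i 0)
  (st.1 ++ [(itr : Int)], st.2.take itr ++ st.2.drop (itr + 1))

def codeA (perm : List Int) : List Int :=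
  ((List.range (perm.length - 1)).foldl (stepA perm) ([], startV perm.length)).1

-- the two rewrite conditions of A's inner `for` loop, in source order
def applicable (cd : List Int) (i : Nat) : Bool :=
  i + 1 < cd.length &&
    (cd.getD i 0 < cd.getD (i + 1) 0 ||
      (cd.getD i 0 == cd.getD (i + 1) 0 && !(cd.getD i 0 == 0) && 0 < i &&
        cd.getD (i - 1) 0 ≤ cd.getD i 0 + 1))

-- the rewrite A performs at the found index (first branch: simultaneous swap+1, second: increment)
def applyOp (cd : List Int) (i : Nat) : List Int :=
  if cd.getD i 0 < cd.getD (i + 1) 0 then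
    (cd.set i (cd.getD (i + 1) 0 + 1)).set (i + 1) (cd.getD i 0)
  else cd.set i (cd.getD i 0 + 1)

-- A's inner `for i in range(len(cd)-1)` with `break`: index of the first applicable rewrite
def findOp (cd : List Int) (i : Nat) : Option Nat :=
  if i + 1 < cd.length then
    (if applicable cd i then some i else findOp cd (i + 1))
  else none
termination_by cd.length - i

-- fuel bound for the while-loops: each rewrite adds 1 to the sum while
-- max_j (cd[j]+j) (floored at 0 termwise) never increases; proved sufficient below
def stairMax : List Int → Int → Int
  | [], _ => 0
  | x :: xs, j => max (max (x + j) 0) (stairMax xs (j + 1))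

def phi (cd : List Int) : Nat := ((cd.length : Int) * stairMax cd 0 - cd.sum).toNat

-- A's `while found_one:` loop (fuel only bounds the number of iterations; it is sufficient)
def goA : Nat → List Int → List Int
  | 0, cd => cd
  | n + 1, cd =>
    match findOp cd 0 with
    | none => cd
    | some i => goA n (applyOp cd i)

def medium_theta (perm : List Int) : List Int :=
  goA (phi (codeA perm) + 1) (codeA perm)

-- ===== PORT B =====

-- `cnt = sum(1 for w in v if w < p)`
def countLt (v : List Int) (p : Int) : Nat := v.countP (fun w => decide (w < p))

-- `for k in range(len(v)): if v[k] >= p: del v[k]; break`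
def removeFirstGe (v : List Int) (p : Int) : List Int :=
  match v with
  | [] => []
  | w :: ws => if p ≤ w then ws else w :: removeFirstGe ws p

-- one iteration of B's `for` body: append the count, delete the first value ≥ p
def stepB (perm : List Int) (st : List Int × List Int) (i : Nat) : List Int × List Int :=
  let p := perm.getD i 0
  (st.1 ++ [(countLt st.2 p : Int)], removeFirstGe st.2 p)

def codeB (perm : List Int) : List Int :=
  ((List.range (perm.length - 1)).foldl (stepB perm) ([], startV perm.length)).1

-- B's pointer loop: `while i+1 < len(cd)` with local backtracking
-- (fuel only bounds the number of pointer events; it is sufficient)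
def goB : Nat → List Int → Nat → List Int
  | 0, cd, _ => cd
  | n + 1, cd, i =>
    if i + 1 < cd.length then
      if applicable cd i then goB n (applyOp cd i) (i - 1)
      else goB n cd (i + 1)
    else cd

def medium_theta_alt (perm : List Int) : List Int :=
  goB ((phi (codeB perm) + 1) * ((codeB perm).length + 1)) (codeB perm) 0

-- ===== PRECONDITION & SPEC =====
def Spec_medium_theta (perm : List Int) (out : List Int) : Prop := out = medium_theta_alt perm
instance (perm : List Int) (out : List Int) : Decidable (Spec_medium_theta perm out) := by unfold Spec_medium_theta; infer_instance

-- ===== CLAIM (what is proved, stated in full; the proofs are below) =====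
def Claim_equal_medium_theta : Prop := ∀ (perm : List Int), Dom_medium_theta perm → Spec_medium_theta perm (medium_theta perm)

-- ===== LEMMAS AND PROOFS =====

theorem getD_set_self {l : List Int} {i : Nat} {a : Int} (h : i < l.length) :
    (l.set i a).getD i 0 = a := by
  simp [List.getD, h]

theorem getD_set_ne {l : List Int} {i k : Nat} {a : Int} (h : i ≠ k) :
    (l.set i a).getD k 0 = l.getD k 0 := by
  simp [List.getD, List.getElem?_set_ne h]

theorem sum_set {l : List Int} {a : Int} : ∀ {i : Nat}, i < l.length →
    (l.set i a).sum = l.sum - l.getD i 0 + a := by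
  induction l with
  | nil => intro i h; simp at h
  | cons x xs ih =>
    intro i h
    cases i with
    | zero => simp [List.getD]; ring
    | succ n =>
      simp only [List.set, List.sum_cons, List.getD, List.getElem?_cons_succ]
      rw [show (xs.set n a).sum = xs.sum - xs.getD n 0 + a from ih (by simpa using h)]
      simp [List.getD]; ring

theorem stairMax_nonneg (cd : List Int) (j : Int) : 0 ≤ stairMax cd j := by
  cases cd with
  | nil => simp [stairMax]
  | cons x xs => simp [stairMax]

theorem le_stairMax (cd : List Int) (j : Int) :
    ∀ (k : Nat), k < cd.length → cd.getD k 0 + (j + (k : Int)) ≤ stairMax cd j := by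
  induction cd generalizing j with
  | nil => intro k h; simp at h
  | cons x xs ih =>
    intro k h
    cases k with
    | zero => simp [stairMax, List.getD]
    | succ n =>
      have := ih (j + 1) n (by simpa using h)
      simp only [stairMax, List.getD, List.getElem?_cons_succ]
      refine le_trans ?_ (le_max_right _ _)
      simp only [List.getD] at this
      push_cast
      linarith

theorem stairMax_le (cd : List Int) (j : Int) (B : Int) (hB : 0 ≤ B)
    (h : ∀ (k : Nat), k < cd.length → cd.getD k 0 + (j + (k : Int)) ≤ B) :
    stairMax cd j ≤ B := by
  induction cd generalizing j with
  | nil => simpa [stairMax]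
  | cons x xs ih =>
    simp only [stairMax, max_le_iff]
    refine ⟨⟨?_, hB⟩, ?_⟩
    · have := h 0 (by simp); simpa [List.getD] using this
    · refine ih (j + 1) ?_
      intro k hk
      have := h (k + 1) (by simpa using hk)
      simp only [List.getD, List.getElem?_cons_succ] at this
      simp only [List.getD] at this ⊢
      push_cast at this ⊢
      linarith

theorem sum_le_len_mul (cd : List Int) (j : Int) :
    cd.sum ≤ (cd.length : Int) * (stairMax cd j - j) := by
  induction cd generalizing j with
  | nil => simp
  | cons x xs ih =>
    have hx : x + j ≤ stairMax (x :: xs) j := by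
      have := le_stairMax (x :: xs) j 0 (by simp)
      simpa [List.getD] using this
    have hmono : stairMax xs (j + 1) ≤ stairMax (x :: xs) j := by
      simp [stairMax]
    have h1 : xs.sum ≤ (xs.length : Int) * (stairMax xs (j + 1) - (j + 1)) := ih (j + 1)
    have h2 : (xs.length : Int) * (stairMax xs (j + 1) - (j + 1)) ≤
        (xs.length : Int) * (stairMax (x :: xs) j - j) := by
      apply mul_le_mul_of_nonneg_left _ (by positivity)
      linarith
    simp only [List.sum_cons, List.length_cons]
    push_cast
    nlinarith [hx, h1, h2]

theorem length_applyOp (cd : List Int) (i : Nat) : (applyOp cd i).length = cd.length := by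
  unfold applyOp; split <;> simp

theorem getD_applyOp_of_lt {cd : List Int} {i k : Nat} (h : k < i) :
    (applyOp cd i).getD k 0 = cd.getD k 0 := by
  unfold applyOp
  split
  · rw [getD_set_ne (by omega), getD_set_ne (by omega)]
  · rw [getD_set_ne (by omega)]

theorem applicable_length {cd : List Int} {i : Nat} (h : applicable cd i = true) :
    i + 1 < cd.length := by
  unfold applicable at h
  simp only [Bool.and_eq_true, decide_eq_true_eq] at h
  exact h.1

theorem sum_applyOp {cd : List Int} {i : Nat} (h : applicable cd i = true) :
    (applyOp cd i).sum = cd.sum + 1 := by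
  have hlen := applicable_length h
  unfold applicable at h
  simp only [Bool.and_eq_true, Bool.or_eq_true, Bool.not_eq_eq_eq_not, Bool.not_true,
    decide_eq_true_eq, beq_iff_eq, beq_eq_false_iff_ne] at h
  unfold applyOp
  split
  · rw [sum_set (by simp; omega), getD_set_ne (by omega), sum_set (by omega)]
    ring
  · rw [sum_set (by omega)]; ring

theorem stairMax_applyOp_le {cd : List Int} {i : Nat} (h : applicable cd i = true) :
    stairMax (applyOp cd i) 0 ≤ stairMax cd 0 := by
  have hlen := applicable_length h
  have hi1 : cd.getD i 0 + (0 + (i : Int)) ≤ stairMax cd 0 := le_stairMax cd 0 i (by omega)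
  have hi2 : cd.getD (i + 1) 0 + (0 + ((i : Int) + 1)) ≤ stairMax cd 0 := by
    have := le_stairMax cd 0 (i + 1) hlen
    push_cast at this ⊢; linarith
  apply stairMax_le _ _ _ (stairMax_nonneg cd 0)
  intro k hk
  rw [length_applyOp] at hk
  by_cases hki : k < i
  · rw [getD_applyOp_of_lt hki]
    exact le_stairMax cd 0 k hk
  by_cases hk2 : i + 1 < k
  · have : (applyOp cd i).getD k 0 = cd.getD k 0 := by
      unfold applyOp
      split
      · rw [getD_set_ne (by omega), getD_set_ne (by omega)]
      · rw [getD_set_ne (by omega)]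
    rw [this]; exact le_stairMax cd 0 k hk
  -- k = i or k = i+1
  unfold applicable at h
  simp only [Bool.and_eq_true, Bool.or_eq_true, Bool.not_eq_eq_eq_not, Bool.not_true,
    decide_eq_true_eq, beq_iff_eq, beq_eq_false_iff_ne] at h
  unfold applyOp
  rcases h with ⟨-, hcond⟩
  by_cases hlt : cd.getD i 0 < cd.getD (i + 1) 0
  · rw [if_pos hlt]
    by_cases hkeq : k = i
    · subst hkeq
      rw [getD_set_ne (by omega), getD_set_self (by omega)]
      push_cast at hi2 ⊢; linarith
    · have hkeq2 : k = i + 1 := by omega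
      subst hkeq2
      rw [getD_set_self (by simp; omega)]
      push_cast at hi2 ⊢; linarith
  · rw [if_neg hlt]
    have heq : cd.getD i 0 = cd.getD (i + 1) 0 := by
      rcases hcond with h1 | h2
      · exact absurd h1 hlt
      · exact h2.1.1.1
    by_cases hkeq : k = i
    · subst hkeq
      rw [getD_set_self (by omega)]
      push_cast at hi2 ⊢; linarith
    · have hkeq2 : k = i + 1 := by omega
      subst hkeq2
      rw [getD_set_ne (by omega)]
      exact le_stairMax cd 0 (i + 1) (by omega)

theorem phi_int_nonneg (cd : List Int) : 0 ≤ (cd.length : Int) * stairMax cd 0 - cd.sum := by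
  have := sum_le_len_mul cd 0
  simp at this
  linarith

theorem phi_applyOp_lt {cd : List Int} {i : Nat} (h : applicable cd i = true) :
    phi (applyOp cd i) < phi cd := by
  unfold phi
  have h1 : ((applyOp cd i).length : Int) * stairMax (applyOp cd i) 0 - (applyOp cd i).sum <
      (cd.length : Int) * stairMax cd 0 - cd.sum := by
    rw [length_applyOp, sum_applyOp h]
    have := stairMax_applyOp_le h
    have hlen : (0 : Int) ≤ (cd.length : Int) := by positivity
    nlinarith
  have h0 := phi_int_nonneg (applyOp cd i)
  omega

theorem findOp_some (cd : List Int) (j i : Nat) (h : findOp cd j = some i) :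
    applicable cd i = true := by
  unfold findOp at h
  split at h
  · split at h
    · cases h; assumption
    · exact findOp_some cd (j + 1) i h
  · cases h
termination_by cd.length - j

-- ----- code-part equivalence -----

theorem bisectLeft_cons_pos {w p : Int} (ws : List Int) (h : p ≤ w) :
    bisectLeft (w :: ws) p = 0 := by
  simp [bisectLeft, List.findIdx?_cons, h]

theorem bisectLeft_cons_neg {w p : Int} (ws : List Int) (h : ¬ p ≤ w) :
    bisectLeft (w :: ws) p = bisectLeft ws p + 1 := by
  simp only [bisectLeft, List.findIdx?_cons, decide_eq_true_eq, if_neg h]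
  cases hf : ws.findIdx? (fun y => decide (p ≤ y)) with
  | none => simp [List.length_cons]
  | some k => simp

theorem countLt_eq {v : List Int} (p : Int) (hv : v.Pairwise (· < ·)) :
    countLt v p = bisectLeft v p := by
  induction v with
  | nil => simp [countLt, bisectLeft]
  | cons w ws ih =>
    rcases List.pairwise_cons.mp hv with ⟨hw, hws⟩
    by_cases h : p ≤ w
    · rw [bisectLeft_cons_pos ws h]
      have h0 : ws.countP (fun u => decide (u < p)) = 0 := by
        rw [List.countP_eq_zero]
        intro u hu
        simp only [decide_eq_true_eq]
        have := hw u hu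
        omega
      simp [countLt, List.countP_cons, h0]
      omega
    · rw [bisectLeft_cons_neg ws h]
      simp only [countLt, List.countP_cons] at ih ⊢
      rw [ih hws]
      simp
      omega

theorem removeFirstGe_eq (v : List Int) (p : Int) :
    removeFirstGe v p = v.take (bisectLeft v p) ++ v.drop (bisectLeft v p + 1) := by
  induction v with
  | nil => simp [removeFirstGe, bisectLeft]
  | cons w ws ih =>
    by_cases h : p ≤ w
    · rw [bisectLeft_cons_pos ws h]
      simp [removeFirstGe, h]
    · rw [bisectLeft_cons_neg ws h]
      simp only [removeFirstGe, if_neg h, List.take_succ_cons, List.drop_succ_cons,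
        List.cons_append, List.cons.injEq, true_and]
      exact ih

theorem removeFirstGe_sublist (v : List Int) (p : Int) : (removeFirstGe v p).Sublist v := by
  induction v with
  | nil => simp [removeFirstGe]
  | cons w ws ih =>
    by_cases h : p ≤ w
    · simp only [removeFirstGe, if_pos h]
      exact List.sublist_cons_self w ws
    · simpa [removeFirstGe, h] using List.Sublist.cons₂ w ih

theorem foldAB (perm : List Int) : ∀ (l : List Nat) (r v : List Int), v.Pairwise (· < ·) →
    l.foldl (stepA perm) (r, v) = l.foldl (stepB perm) (r, v) := by
  intro l
  induction l with
  | nil => intro r v hv; rfl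
  | cons a l ih =>
    intro r v hv
    simp only [List.foldl_cons]
    have hstep : stepA perm (r, v) a = stepB perm (r, v) a := by
      unfold stepA stepB
      simp only
      rw [countLt_eq (perm.getD a 0) hv, removeFirstGe_eq v (perm.getD a 0)]
    rw [hstep]
    unfold stepB
    exact ih _ _ (List.Pairwise.sublist (removeFirstGe_sublist v _) hv)

theorem pairwise_startV (L : Nat) : (startV L).Pairwise (· < ·) := by
  refine List.Pairwise.map _ ?_ List.pairwise_lt_range
  intro a b hab
  dsimp only
  omega

theorem code_eq (perm : List Int) : codeA perm = codeB perm := by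
  unfold codeA codeB
  rw [foldAB perm _ _ _ (pairwise_startV _)]

-- ----- transform-loop equivalence -----

theorem applicable_false_of_ge {cd : List Int} {i : Nat} (h : ¬ i + 1 < cd.length) :
    applicable cd i = false := by
  unfold applicable
  simp only [Bool.and_eq_false_iff]
  left
  simpa using h

theorem findOp_none (cd : List Int) (j : Nat)
    (h : ∀ k, j ≤ k → applicable cd k = false) : findOp cd j = none := by
  unfold findOp
  split
  · rw [h j le_rfl]
    simp only [Bool.false_eq_true, if_false]
    exact findOp_none cd (j + 1) (fun k hk => h k (by omega))
  · rfl
termination_by cd.length - j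

theorem findOp_first (cd : List Int) (j i : Nat) (hj : j ≤ i)
    (hbelow : ∀ k, j ≤ k → k < i → applicable cd k = false)
    (hap : applicable cd i = true) : findOp cd j = some i := by
  by_cases hji : j = i
  · subst hji
    unfold findOp
    rw [if_pos (applicable_length hap), if_pos hap]
  · have hlen : j + 1 < cd.length := by
      have := applicable_length hap; omega
    unfold findOp
    rw [if_pos hlen, hbelow j le_rfl (by omega)]
    simp only [Bool.false_eq_true, if_false]
    exact findOp_first cd (j + 1) i (by omega) (fun k hk1 hk2 => hbelow k (by omega) hk2) hap
termination_by cd.length - j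

theorem applicable_applyOp_of_lt {cd : List Int} {i k : Nat} (h : k + 1 < i) :
    applicable (applyOp cd i) k = applicable cd k := by
  unfold applicable
  rw [length_applyOp, getD_applyOp_of_lt (by omega), getD_applyOp_of_lt (by omega),
    getD_applyOp_of_lt (by omega)]

-- with sufficient fuel, goA does not depend on the exact fuel value
theorem goA_irrel : ∀ (n : Nat), ∀ (m : Nat) (cd : List Int),
    phi cd < n → phi cd < m → goA n cd = goA m cd := by
  intro n
  induction n with
  | zero => intro m cd h _; omega
  | succ n ih =>
    intro m cd hn hm
    cases m with
    | zero => omega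
    | succ m =>
      simp only [goA]
      cases hf : findOp cd 0 with
      | none => rfl
      | some i =>
        have hap := findOp_some cd 0 i hf
        have hlt := phi_applyOp_lt hap
        exact ih m (applyOp cd i) (by omega) (by omega)

theorem goB_main : ∀ (n : Nat), ∀ (cd : List Int) (i : Nat),
    phi cd * (cd.length + 1) + (cd.length - i) + 1 ≤ n →
    (∀ j, j < i → applicable cd j = false) →
    goB n cd i = goA (phi cd + 1) cd := by
  intro n
  induction n with
  | zero => intro cd i hfuel _; omega
  | succ n ih =>
    intro cd i hfuel hinv
    by_cases hlen : i + 1 < cd.length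
    · by_cases hap : applicable cd i
      · -- rewrite at i, pointer backtracks to i-1
        simp only [goB, if_pos hlen, if_pos hap]
        have hfind : findOp cd 0 = some i :=
          findOp_first cd 0 i (Nat.zero_le i) (fun k _ hk => hinv k hk) hap
        have hlt := phi_applyOp_lt hap
        have hL := length_applyOp cd i
        -- unfold goA one step on the right
        have hstep : goA (phi cd + 1) cd = goA (phi cd) (applyOp cd i) := by
          rw [show goA (phi cd + 1) cd =
            (match findOp cd 0 with
             | none => cd
             | some j => goA (phi cd) (applyOp cd j)) from rfl, hfind]
        have hgoA : goA (phi cd + 1) cd = goA (phi (applyOp cd i) + 1) (applyOp cd i) :=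
          hstep.trans (goA_irrel (phi cd) _ (applyOp cd i) (by omega) (by omega))
        rw [hgoA]
        refine ih (applyOp cd i) (i - 1) ?_ ?_
        · rw [hL]
          have hmul : (phi (applyOp cd i) + 1) * (cd.length + 1) ≤ phi cd * (cd.length + 1) :=
            Nat.mul_le_mul_right _ (by omega)
          have hexp : (phi (applyOp cd i) + 1) * (cd.length + 1) =
              phi (applyOp cd i) * (cd.length + 1) + (cd.length + 1) := by ring
          omega
        · intro j hj
          rw [applicable_applyOp_of_lt (by omega)]
          exact hinv j (by omega)
      · -- advance the pointer
        simp only [goB, if_pos hlen, if_neg hap]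
        refine ih cd (i + 1) (by omega) ?_
        intro j hj
        by_cases hji : j = i
        · subst hji; exact Bool.eq_false_iff.mpr hap
        · exact hinv j (by omega)
    · -- pointer ran off the end: no rewrite is applicable anywhere
      simp only [goB, if_neg hlen]
      have hnone : findOp cd 0 = none := by
        refine findOp_none cd 0 ?_
        intro k _
        by_cases hk : k < i
        · exact hinv k hk
        · exact applicable_false_of_ge (by omega)
      simp only [goA, hnone]

theorem loop_eq (cd : List Int) : goB ((phi cd + 1) * (cd.length + 1)) cd 0 = goA (phi cd + 1) cd := by
  refine goB_main _ cd 0 (by ring_nf; omega) (by omega)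

-- ===== VERDICT (by name: the statement is the Claim_ definition above) =====
theorem medium_theta_spec : Claim_equal_medium_theta := by
  intro perm _
  unfold Spec_medium_theta medium_theta medium_theta_alt
  rw [code_eq, loop_eq]
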